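-- pv_equiv track=rewrite | github.com/le-codeur-rapide/pyOutlook | internal_methods.py | jsonify_receps
-- ===== SOURCE A (Python) =====
-- class MiscError(Exception):
--     def __init__(self, value):
--         self.value = value
--
--     def __str__(self):
--         return self.value
--
-- def jsonify_receps(recep_input, recep_type, silent):
--
--     json_return = ''
--     if not silent:
--         if recep_type == "cc":
--             json_return = '"CcRecipients":['
--         elif recep_type == "to":
--             json_return = '"ToRecipients":['
--         elif recep_type == "bcc":
--             json_return = '"BccRecipients":['
--         else:
--             raise MiscError('To or CC recipients not provided')
--
--     receps = recep_input.split(',')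
--     for num in range(len(receps)):
--         receps[num] = receps[num].strip()
--
--     for m in range(0, len(receps)):
--         if len(receps) - m == 1:
--             insert = receps[m].replace('"', "'")
--             json_return += '{ "EmailAddress": { "Address": "' + insert + '" } }'
--         else:
--             insert = receps[m].replace('"', "'")
--             json_return += '{ "EmailAddress": { "Address": "' + insert + '" } },'
--
--     return json_return
-- ===== SOURCE B (Python) =====
-- class MiscError(Exception):
--     def __init__(self, value):
--         self.value = value
--
--     def __str__(self):
--         return self.value
--
--
-- def jsonify_receps(recep_input, recep_type, silent):
--     # single left-to-right character scan with a sentinel comma; no split(),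
--     # no index arithmetic, no last-element test
--     if silent:
--         out = ''
--     elif recep_type == "cc":
--         out = '"CcRecipients":['
--     elif recep_type == "to":
--         out = '"ToRecipients":['
--     elif recep_type == "bcc":
--         out = '"BccRecipients":['
--     else:
--         raise MiscError('To or CC recipients not provided')
--
--     buf = []
--     first = True
--     for ch in recep_input + ',':  # the sentinel comma flushes the final piece
--         if ch == ',':
--             piece = ''.join(buf).strip().replace('"', "'")
--             if not first:
--                 out += ','
--             out += '{ "EmailAddress": { "Address": "' + piece + '" } }'
--             first = False
--             buf = []
--         else:
--             buf.append(ch)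
--     return out
-- ===== Notes on version B (the rewrite author's own statement) =====
-- stated objective: alternative
-- what changed: Replaces A's split-then-strip pre-pass plus indexed loop with a positional last-element test by one left-to-right character scan with a piece buffer and a sentinel comma that flushes each piece as it is completed.
import Mathlib
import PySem

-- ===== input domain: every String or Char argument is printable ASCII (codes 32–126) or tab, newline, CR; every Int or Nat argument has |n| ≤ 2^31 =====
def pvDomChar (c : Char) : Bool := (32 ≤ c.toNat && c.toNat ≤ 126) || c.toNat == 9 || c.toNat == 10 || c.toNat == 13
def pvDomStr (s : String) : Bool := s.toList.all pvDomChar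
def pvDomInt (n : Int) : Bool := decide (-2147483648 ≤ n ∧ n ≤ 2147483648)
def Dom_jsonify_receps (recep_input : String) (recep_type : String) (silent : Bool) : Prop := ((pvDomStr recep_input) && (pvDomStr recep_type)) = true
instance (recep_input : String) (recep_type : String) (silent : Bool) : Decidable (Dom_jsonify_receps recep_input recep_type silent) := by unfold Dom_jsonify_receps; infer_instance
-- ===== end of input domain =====

-- B replaces A's split-then-strip pre-pass and indexed last-element-test loop by one
-- character scan with a piece buffer and a sentinel comma (alternative decomposition).
-- Pre_ excludes exactly the inputs where A raises MiscError (not silent and recep_type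
-- not one of cc/to/bcc); B raises there too.


-- ===== PORT A =====
-- A's second loop iterates positions, appending the formatted fragment, with a ','
-- appended except at the last position (len(receps) - m == 1); transcribed as the
-- structural recursion over the stripped pieces with the same last-element branch.
def jsonifyLoopA (acc : String) : List String → String
  | [] => acc
  | [x] =>
      acc ++ ("{ \"EmailAddress\": { \"Address\": \"" ++ PySem.Str.replace x "\"" "'" ++ "\" } }")
  | x :: y :: rest =>
      jsonifyLoopA
        (acc ++ ("{ \"EmailAddress\": { \"Address\": \"" ++ PySem.Str.replace x "\"" "'" ++ "\" } },"))
        (y :: rest)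

def jsonify_receps (recep_input : String) (recep_type : String) (silent : Bool) : String :=
  let json_return : String :=
    if !silent then
      if recep_type == "cc" then "\"CcRecipients\":["
      else if recep_type == "to" then "\"ToRecipients\":["
      else if recep_type == "bcc" then "\"BccRecipients\":["
      else ""  -- Python raises MiscError here; excluded by Pre_jsonify_receps
    else ""
  let receps := ((PySem.Str.split? recep_input ",").getD []).map PySem.Str.strip
  jsonifyLoopA json_return receps

-- ===== PORT B =====
-- B's flush: strip the buffered piece, swap '"' for '\'', wrap it as a fragment.
def fragB (buf : List Char) : List Char :=
  "{ \"EmailAddress\": { \"Address\": \"".toList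
    ++ PySem.Chars.replace (PySem.Chars.strip buf) ['\"'] ['\'']
    ++ "\" } }".toList

-- Source B's character loop: out / buf / first are the loop state, the argument list the
-- remaining characters of recep_input + ',' (the sentinel comma flushes the last piece).
def scanB (out : List Char) (buf : List Char) (first : Bool) : List Char → List Char
  | [] => out
  | c :: cs =>
      if c = ',' then
        scanB (out ++ (if first then [] else [',']) ++ fragB buf) [] false cs
      else
        scanB out (buf ++ [c]) first cs

def jsonify_receps_alt (recep_input : String) (recep_type : String) (silent : Bool) : String :=
  let pre : String :=
    if silent then ""
    else if recep_type == "cc" then "\"CcRecipients\":["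
    else if recep_type == "to" then "\"ToRecipients\":["
    else if recep_type == "bcc" then "\"BccRecipients\":["
    else ""  -- Python raises MiscError here; excluded by Pre_jsonify_receps
  String.ofList (scanB pre.toList [] true (recep_input.toList ++ [',']))

-- ===== PRECONDITION & SPEC =====
-- Pre_ excludes exactly the inputs on which A raises MiscError (not silent and an unknown recep_type).
def Pre_jsonify_receps (recep_input : String) (recep_type : String) (silent : Bool) : Prop :=
  silent = true ∨ recep_type = "cc" ∨ recep_type = "to" ∨ recep_type = "bcc"
instance (recep_input : String) (recep_type : String) (silent : Bool) : Decidable (Pre_jsonify_receps recep_input recep_type silent) := by unfold Pre_jsonify_receps; infer_instance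

def pvWitness_jsonify_receps : String × String × Bool := ("a@b.com, c@d.org", "to", false)

def Spec_jsonify_receps (recep_input : String) (recep_type : String) (silent : Bool) (out : String) : Prop := out = jsonify_receps_alt recep_input recep_type silent
instance (recep_input : String) (recep_type : String) (silent : Bool) (out : String) : Decidable (Spec_jsonify_receps recep_input recep_type silent out) := by unfold Spec_jsonify_receps; infer_instance

-- ===== CLAIM (what is proved, stated in full; the proofs are below) =====
def Claim_equal_jsonify_receps : Prop := ∀ (recep_input : String) (recep_type : String) (silent : Bool), Dom_jsonify_receps recep_input recep_type silent → Pre_jsonify_receps recep_input recep_type silent → Spec_jsonify_receps recep_input recep_type silent (jsonify_receps recep_input recep_type silent)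

-- ===== LEMMAS AND PROOFS =====

theorem modifyHead_id' {α : Type} (l : List α) :
    List.modifyHead (fun x => x) l = l := by
  cases l <;> simp

-- Reference split: Python's s.split(',') on the character list.
def splitC : List Char → List (List Char)
  | [] => [[]]
  | c :: cs =>
      if c = ',' then [] :: splitC cs
      else
        match splitC cs with
        | [] => [[c]]  -- unreachable: splitC never returns []
        | p :: ps => (c :: p) :: ps

theorem splitC_ne_nil (l : List Char) : splitC l ≠ [] := by
  cases l with
  | nil => simp [splitC]
  | cons c cs =>
      simp only [splitC]
      split
      · simp
      · split <;> simp

theorem splitOn_go_eq_splitC (fuel : Nat) (l cur : List Char) (acc : List (List Char)) (h : l.length < fuel) :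
    PySem.Chars.splitOn.go [','] fuel l cur acc
      = acc.reverse ++ List.modifyHead (cur.reverse ++ ·) (splitC l) := by
  induction fuel generalizing l cur acc with
  | zero => omega
  | succ n ih =>
      cases l with
      | nil => rw [PySem.Chars.splitOn.go.eq_def]; simp [splitC]
      | cons c cs =>
          rw [PySem.Chars.splitOn.go.eq_def]
          simp only []
          by_cases hc : c = ','
          · subst hc
            have hpre : [','].isPrefixOf (',' :: cs) = true := by simp [List.isPrefixOf]
            rw [if_pos hpre]
            simp only [List.length_cons, List.drop_succ_cons, List.length_nil, List.drop_zero]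
            rw [ih cs [] (cur.reverse :: acc) (by simpa using Nat.lt_of_succ_lt_succ h)]
            simp [splitC]
            cases hsp : splitC cs with
            | nil => exact absurd hsp (splitC_ne_nil cs)
            | cons p ps => simp
          · have hpre : [','].isPrefixOf (c :: cs) = false := by
              simp [List.isPrefixOf]
              exact fun h' => absurd h'.symm hc
            rw [if_neg (by simp [hpre])]
            rw [ih cs (c :: cur) acc (by simpa using Nat.lt_of_succ_lt_succ h)]
            simp only [splitC, if_neg hc]
            cases hsp : splitC cs with
            | nil => exact absurd hsp (splitC_ne_nil cs)
            | cons p ps => simp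

theorem splitOn_comma_eq_splitC (l : List Char) :
    PySem.Chars.splitOn l [','] = splitC l := by
  unfold PySem.Chars.splitOn
  rw [splitOn_go_eq_splitC (l.length + 1) l [] [] (by omega)]
  cases hsp : splitC l with
  | nil => exact absurd hsp (splitC_ne_nil l)
  | cons p ps => simp

-- B's scan, characterised: it appends the joined fragments of the pieces of the
-- remaining input (the open piece prefixed by the buffer), with a leading ',' unless first.
theorem scanB_eq_join (l : List Char) (out buf : List Char) (first : Bool) :
    scanB out buf first (l ++ [','])
      = out ++ (if first then [] else [','])
          ++ PySem.Chars.join [','] ((List.modifyHead (buf ++ ·) (splitC l)).map fragB) := by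
  induction l generalizing out buf first with
  | nil =>
      simp [scanB, splitC, PySem.Chars.join_singleton]
  | cons c cs ih =>
      by_cases hc : c = ','
      · subst hc
        show scanB _ _ _ (',' :: (cs ++ [','])) = _
        rw [scanB, if_pos rfl, ih]
        cases hsp : splitC cs with
        | nil => exact absurd hsp (splitC_ne_nil cs)
        | cons p ps =>
            simp [splitC, hsp, PySem.Chars.join_cons_cons]
      · show scanB _ _ _ (c :: (cs ++ [','])) = _
        rw [scanB, if_neg hc, ih]
        cases hsp : splitC cs with
        | nil => exact absurd hsp (splitC_ne_nil cs)
        | cons p ps =>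
            simp [splitC, if_neg hc, hsp]

-- A's loop, characterised as the fragment join over the (already stripped) pieces.
theorem jsonifyLoopA_eq_join (l : List String) (acc : String) :
    jsonifyLoopA acc l
      = acc ++ PySem.Str.join ","
          (l.map (fun piece =>
            "{ \"EmailAddress\": { \"Address\": \"" ++ PySem.Str.replace piece "\"" "'" ++ "\" } }")) := by
  induction l generalizing acc with
  | nil =>
      apply String.ext
      simp [jsonifyLoopA, PySem.Str.join, PySem.Chars.join_nil]
  | cons x t ih =>
      cases t with
      | nil =>
          apply String.ext
          simp [jsonifyLoopA, PySem.Str.join, PySem.Chars.join_singleton]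
      | cons y r =>
          rw [jsonifyLoopA, ih]
          apply String.ext
          simp [PySem.Str.join, PySem.Chars.join_cons_cons]

-- ===== VERDICT (by name: the statement is the Claim_ definition above) =====
theorem jsonify_receps_spec : Claim_equal_jsonify_receps := by
  intro recep_input recep_type silent _ hpre
  unfold Spec_jsonify_receps jsonify_receps jsonify_receps_alt
  rw [jsonifyLoopA_eq_join, List.map_map]
  have hsplit : (PySem.Str.split? recep_input ",").getD []
      = (splitC recep_input.toList).map String.ofList := by
    simp [PySem.Str.split?, PySem.Chars.split?, splitOn_comma_eq_splitC]
  rw [hsplit, List.map_map]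
  apply String.ext
  have hfrag : List.map fragB = List.map (fun b : List Char =>
      "{ \"EmailAddress\": { \"Address\": \"".toList
        ++ PySem.Chars.replace (PySem.Chars.strip b) ['\"'] ['\'']
        ++ "\" } }".toList) := by
    funext l; exact List.map_congr_left (fun b _ => rfl)
  cases silent <;>
    simp [scanB_eq_join, PySem.Str.join, hfrag, Function.comp_def, PySem.Str.strip,
      PySem.Str.replace, modifyHead_id']
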